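-- pv_equiv track=rewrite | github.com/neildhir/DCBO | dcbo/experimental/analyse_results.py | get_stored_blanket
-- ===== SOURCE A (Python) =====
-- from copy import deepcopy
--
-- def get_stored_blanket(T, data, n_replicates, list_var):
--     store_blankets = {
--         model: [[{var: [None] * T for var in list_var} for _ in range(T)] for _ in range(n_replicates)]
--         for model in data.keys()
--     }
--     for method in data.keys():
--         for r in range(n_replicates):
--             for t in range(1, T):
--                 values = data[method][r][3]
--                 store_blankets[method][r][t] = deepcopy(store_blankets[method][r][t - 1])
--                 for var in list_var:
--                     store_blankets[method][r][t][var][t - 1] = values[var][t - 1]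
--
--                 if store_blankets[method][r][t]["X"][t - 1] is not None and method in ["CBO", "DCBO"]:
--                     store_blankets[method][r][t]["Z"][t - 1] = None
--     return store_blankets
-- ===== SOURCE B (Python) =====
-- def get_stored_blanket(T, data, n_replicates, list_var):
--     # Build each cumulative snapshot independently from the stored values: no deepcopy chain.
--     def snapshot(method, r, t):
--         blanket = {var: [None] * T for var in list_var}
--         if t == 0:
--             return blanket
--         values = data[method][r][3]
--         cbo = method in ("CBO", "DCBO")
--         for i in range(t):
--             for var in list_var:
--                 blanket[var][i] = values[var][i]
--             if values["X"][i] is not None and cbo: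
--                 blanket["Z"][i] = None
--         return blanket
--
--     return {
--         method: [[snapshot(method, r, t) for t in range(T)] for r in range(n_replicates)]
--         for method in data
--     }
-- ===== Notes on version B (the rewrite author's own statement) =====
-- stated objective: simpler
-- what changed: Each cumulative blanket snapshot is rebuilt independently from scratch (fill rows 0..t-1 directly from the stored values, testing values['X'][i]), instead of deepcopy-ing the previous snapshot inside a stateful t-loop and patching only row t-1; the deepcopy chain and the mutable copy-forward state disappear.
import Mathlib
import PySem

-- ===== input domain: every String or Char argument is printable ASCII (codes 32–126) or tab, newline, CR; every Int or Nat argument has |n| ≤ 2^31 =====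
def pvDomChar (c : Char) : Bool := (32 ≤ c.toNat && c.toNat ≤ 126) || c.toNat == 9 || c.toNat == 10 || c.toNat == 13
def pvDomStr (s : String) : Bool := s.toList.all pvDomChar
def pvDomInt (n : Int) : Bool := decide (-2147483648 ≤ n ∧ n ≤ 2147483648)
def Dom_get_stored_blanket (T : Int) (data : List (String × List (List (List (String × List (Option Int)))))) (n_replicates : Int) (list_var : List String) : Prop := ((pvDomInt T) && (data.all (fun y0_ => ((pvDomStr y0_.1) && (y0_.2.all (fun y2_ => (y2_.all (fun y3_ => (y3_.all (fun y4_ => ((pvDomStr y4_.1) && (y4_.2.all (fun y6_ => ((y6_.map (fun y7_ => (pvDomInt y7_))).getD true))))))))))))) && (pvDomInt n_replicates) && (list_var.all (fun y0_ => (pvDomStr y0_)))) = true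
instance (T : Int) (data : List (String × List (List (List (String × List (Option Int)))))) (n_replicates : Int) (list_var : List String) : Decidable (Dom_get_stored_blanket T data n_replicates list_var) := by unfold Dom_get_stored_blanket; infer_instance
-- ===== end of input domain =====

-- B rebuilds every cumulative snapshot from scratch instead of deepcopy-ing the previous one ('simpler': no copy-forward state).

-- ===== PORT A =====
-- shared primitives: Python dict getitem/setitem on the blanket association lists
def pvGet (b : List (String × List (Option Int))) (var : String) : List (Option Int) :=
  ((PySem.Dict.mk b).get? var).getD []
  -- b[var]; the [] default is reached only where Python raises KeyError (excluded by Pre_)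

def pvSet (b : List (String × List (Option Int))) (var : String) (row : List (Option Int)) : List (String × List (Option Int)) :=
  ((PySem.Dict.mk b).insert var row).items  -- b[var] = row (overwrite in place, new keys append)

def pvBlank (T : Int) (list_var : List String) : List (String × List (Option Int)) :=
  list_var.foldl (fun b var => pvSet b var (List.replicate T.toNat none)) []
  -- {var: [None] * T for var in list_var}; [None]*T is [] for T < 0 (toNat is a repetition count, not an index)

def pvValues (data : List (String × List (List (List (String × List (Option Int)))))) (method : String) (r : Int) : List (String × List (Option Int)) :=
  PySem.List.pyGetD (PySem.List.pyGetD (((PySem.Dict.mk data).get? method).getD []) r []) 3 []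
  -- values = data[method][r][3]; defaults reached only where Python raises (excluded by Pre_)

-- body of A's 'for t in range(1, T)' loop, threading store_blankets[method][r] (the only object it mutates)
def pvAStep (data : List (String × List (List (List (String × List (Option Int)))))) (list_var : List String)
    (method : String) (r : Int) (snaps : List (List (String × List (Option Int)))) (t : Int) :
    List (List (String × List (Option Int))) :=
  let values := pvValues data method r
  -- store_blankets[method][r][t] = deepcopy(store_blankets[method][r][t - 1])
  let snaps := PySem.List.pySetD snaps t (PySem.List.pyGetD snaps (t - 1) [])
  -- for var in list_var: store_blankets[method][r][t][var][t - 1] = values[var][t - 1]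
  let blanket := list_var.foldl (fun b var =>
      pvSet b var (PySem.List.pySetD (pvGet b var) (t - 1)
        (PySem.List.pyGetD (pvGet values var) (t - 1) none))) (PySem.List.pyGetD snaps t [])
  -- if store_blankets[method][r][t]["X"][t - 1] is not None and method in ["CBO", "DCBO"]: ...["Z"][t - 1] = None
  let blanket := if (PySem.List.pyGetD (pvGet blanket "X") (t - 1) none).isSome && ["CBO", "DCBO"].contains method then
      pvSet blanket "Z" (PySem.List.pySetD (pvGet blanket "Z") (t - 1) none)
    else blanket
  PySem.List.pySetD snaps t blanket

def get_stored_blanket (T : Int) (data : List (String × List (List (List (String × List (Option Int)))))) (n_replicates : Int) (list_var : List String) : List (String × List (List (List (String × List (Option Int))))) :=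
  -- the store_blankets dict comprehension is the seed of the mutation loop over data.keys()
  ((PySem.Dict.mk data).keys.foldl (fun sb method =>
      sb.modify method [] (fun reps =>
        (PySem.List.pyRange 0 n_replicates 1).foldl (fun reps r =>
          PySem.List.pySetD reps r
            ((PySem.List.pyRange 1 T 1).foldl (pvAStep data list_var method r)
              (PySem.List.pyGetD reps r []))) reps))
    ((PySem.Dict.mk data).keys.foldl (fun sb model =>
      sb.insert model ((PySem.List.pyRange 0 n_replicates 1).map (fun _ =>
        (PySem.List.pyRange 0 T 1).map (fun _ => pvBlank T list_var)))) PySem.Dict.empty)).items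

-- ===== PORT B =====
-- B-side helper: one cumulative snapshot, built from scratch (Source B's `snapshot`)
def pvBSnapshot (T : Int) (data : List (String × List (List (List (String × List (Option Int)))))) (list_var : List String) (method : String) (r t : Int) : List (String × List (Option Int)) :=
  let blanket := pvBlank T list_var
  if t = 0 then blanket
  else
    let values := pvValues data method r
    let cbo := method == "CBO" || method == "DCBO"
    (PySem.List.pyRange 0 t 1).foldl (fun blanket i =>
      let blanket := list_var.foldl (fun b var =>
          pvSet b var (PySem.List.pySetD (pvGet b var) i
            (PySem.List.pyGetD (pvGet values var) i none))) blanket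
      if (PySem.List.pyGetD (pvGet values "X") i none).isSome && cbo then
        pvSet blanket "Z" (PySem.List.pySetD (pvGet blanket "Z") i none)
      else blanket) blanket

def get_stored_blanket_alt (T : Int) (data : List (String × List (List (List (String × List (Option Int)))))) (n_replicates : Int) (list_var : List String) : List (String × List (List (List (String × List (Option Int))))) :=
  ((PySem.Dict.mk data).keys.foldl (fun out method =>
      out.insert method ((PySem.List.pyRange 0 n_replicates 1).map (fun r =>
        (PySem.List.pyRange 0 T 1).map (fun t => pvBSnapshot T data list_var method r t)))) PySem.Dict.empty).items

-- ===== PRECONDITION & SPEC =====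
-- Pre_ = exactly the inputs on which the Python A returns (otherwise it raises KeyError/IndexError), plus
-- distinct dict keys in `data` (duplicate keys cannot arise from a Python dict argument).
def Pre_get_stored_blanket (T : Int) (data : List (String × List (List (List (String × List (Option Int)))))) (n_replicates : Int) (list_var : List String) : Prop :=
  (data.map Prod.fst).Nodup ∧
  (T ≤ 1 ∨ n_replicates ≤ 0 ∨ data = [] ∨
    ("X" ∈ list_var ∧
     ∀ p ∈ data,
       n_replicates ≤ (p.2.length : Int) ∧
       ∀ rep ∈ p.2.take n_replicates.toNat,
         3 < rep.length ∧
         (∀ var ∈ list_var,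
            ((PySem.Dict.mk (rep.getD 3 [])).get? var).isSome = true ∧
            T - 1 ≤ ((((PySem.Dict.mk (rep.getD 3 [])).get? var).getD []).length : Int)) ∧
         ((p.1 = "CBO" ∨ p.1 = "DCBO") →
           (∃ c ∈ (((PySem.Dict.mk (rep.getD 3 [])).get? "X").getD []).take (T - 1).toNat, c.isSome) →
           "Z" ∈ list_var)))
instance (T : Int) (data : List (String × List (List (List (String × List (Option Int)))))) (n_replicates : Int) (list_var : List String) : Decidable (Pre_get_stored_blanket T data n_replicates list_var) := by
  unfold Pre_get_stored_blanket
  haveI h1 : DecidableEq (List (String × List (Option Int))) := inferInstance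
  haveI h2 : DecidableEq (List (List (String × List (Option Int)))) := inferInstance
  haveI h3 : DecidableEq (List (List (List (String × List (Option Int))))) := inferInstance
  haveI h4 : DecidableEq (String × List (List (List (String × List (Option Int))))) := inferInstance
  infer_instance

def pvWitness_get_stored_blanket : Int × (List (String × List (List (List (String × List (Option Int)))))) × Int × List String :=
  (2, [("DCBO", [[[], [], [], [("X", [some 1]), ("Z", [some 2])]]])], 1, ["X", "Z"])

def Spec_get_stored_blanket (T : Int) (data : List (String × List (List (List (String × List (Option Int)))))) (n_replicates : Int) (list_var : List String) (out : List (String × List (List (List (String × List (Option Int)))))) : Prop := out = get_stored_blanket_alt T data n_replicates list_var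
instance (T : Int) (data : List (String × List (List (List (String × List (Option Int)))))) (n_replicates : Int) (list_var : List String) (out : List (String × List (List (List (String × List (Option Int)))))) : Decidable (Spec_get_stored_blanket T data n_replicates list_var out) := by
  unfold Spec_get_stored_blanket
  haveI h1 : DecidableEq (List (String × List (Option Int))) := inferInstance
  haveI h2 : DecidableEq (List (List (String × List (Option Int)))) := inferInstance
  haveI h3 : DecidableEq (List (List (List (String × List (Option Int))))) := inferInstance
  haveI h4 : DecidableEq (String × List (List (List (String × List (Option Int))))) := inferInstance
  infer_instance

-- ===== CLAIM (what is proved, stated in full; the proofs are below) =====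
def Claim_equal_get_stored_blanket : Prop := ∀ (T : Int) (data : List (String × List (List (List (String × List (Option Int)))))) (n_replicates : Int) (list_var : List String), Dom_get_stored_blanket T data n_replicates list_var → Pre_get_stored_blanket T data n_replicates list_var → Spec_get_stored_blanket T data n_replicates list_var (get_stored_blanket T data n_replicates list_var)

-- ===== LEMMAS AND PROOFS =====

-- dict/list primitive facts
theorem pvGet_pvSet (b : List (String × List (Option Int))) (v x : String) (row : List (Option Int)) :
    pvGet (pvSet b v row) x = if x = v then row else pvGet b x := by
  unfold pvGet pvSet
  rw [show PySem.Dict.mk (((PySem.Dict.mk b).insert v row).items) = (PySem.Dict.mk b).insert v row from rfl,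
    PySem.Dict.get?_insert]
  split_ifs <;> rfl

theorem pvSetD_oob {α : Type} (xs : List α) (i : Int) (v : α) (h0 : 0 ≤ i) (h : xs.length ≤ i.toNat) :
    PySem.List.pySetD xs i v = xs := by
  unfold PySem.List.pySetD
  rw [(PySem.List.pySet?_eq_none_iff xs i v).2]
  · rfl
  · unfold PySem.Raise.InRange; omega

theorem pvSetD_idem {α : Type} (xs : List α) (i : Int) (v w : α) (h0 : 0 ≤ i) :
    PySem.List.pySetD (PySem.List.pySetD xs i v) i w = PySem.List.pySetD xs i w := by
  by_cases h : i.toNat < xs.length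
  · rw [PySem.List.pySetD_of_nonneg _ _ h0, PySem.List.pySetD_of_nonneg _ _ h0,
      PySem.List.pySetD_of_nonneg _ _ h0, List.set_set]
  · rw [pvSetD_oob xs i v h0 (by omega)]

theorem pvGetD_pvSetD_self {α : Type} (xs : List α) (i : Int) (v d : α) (h0 : 0 ≤ i) (h : i.toNat < xs.length) :
    PySem.List.pyGetD (PySem.List.pySetD xs i v) i d = v := by
  rw [PySem.List.pySetD_of_nonneg _ _ h0,
    PySem.List.pyGetD_eq_getElem _ _ h0 (by simp only [List.length_set]; omega)]
  simp

-- lookups through the shared var-fill loop and through the blank-dict comprehension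
theorem pvGet_fill (vals : List (String × List (Option Int))) (i : Int) (h0 : 0 ≤ i) :
    ∀ (lv : List String) (b : List (String × List (Option Int))) (x : String),
    pvGet (lv.foldl (fun b var =>
        pvSet b var (PySem.List.pySetD (pvGet b var) i
          (PySem.List.pyGetD (pvGet vals var) i none))) b) x
      = if x ∈ lv then PySem.List.pySetD (pvGet b x) i (PySem.List.pyGetD (pvGet vals x) i none)
        else pvGet b x := by
  intro lv
  induction lv with
  | nil => intro b x; simp
  | cons v rest ih =>
    intro b x
    simp only [List.foldl_cons]
    rw [ih]
    by_cases hxv : x = v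
    · subst hxv
      by_cases hx : x ∈ rest <;>
        simp [hx, pvGet_pvSet, pvSetD_idem _ i _ _ h0]
    · by_cases hx : x ∈ rest <;> simp [hx, hxv, pvGet_pvSet]

theorem pvGet_blank (T : Int) (lv : List String) (x : String) :
    pvGet (pvBlank T lv) x = if x ∈ lv then List.replicate T.toNat none else [] := by
  unfold pvBlank
  have gen : ∀ (l : List String) (b : List (String × List (Option Int))),
      pvGet (l.foldl (fun b var => pvSet b var (List.replicate T.toNat none)) b) x
        = if x ∈ l then List.replicate T.toNat none else pvGet b x := by
    intro l
    induction l with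
    | nil => intro b; simp
    | cons v rest ih =>
      intro b
      simp only [List.foldl_cons]
      rw [ih]
      by_cases hxv : x = v
      · subst hxv
        by_cases hx : x ∈ rest <;> simp [hx, pvGet_pvSet]
      · by_cases hx : x ∈ rest <;> simp [hx, hxv, pvGet_pvSet]
  rw [gen]
  rfl

theorem pvSetD_map_pyRange {α : Type} (f : Int → α) (n k : Int) (v : α) (h0 : 0 ≤ k) (_hk : k < n) :
    PySem.List.pySetD ((PySem.List.pyRange 0 n 1).map f) k v
      = (PySem.List.pyRange 0 n 1).map (fun j => if j = k then v else f j) := by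
  rw [PySem.List.pySetD_of_nonneg _ _ h0]
  apply List.ext_getElem
  · simp
  · intro j h1 h2
    simp only [List.getElem_set, List.getElem_map, PySem.List.getElem_pyRange_one]
    by_cases hj : k.toNat = j
    · rw [if_pos hj, if_pos (by omega)]
    · rw [if_neg hj, if_neg (by omega)]

theorem pvContains_eq (m : String) : (["CBO", "DCBO"].contains m) = (m == "CBO" || m == "DCBO") := by
  cases h1 : m == "CBO" <;> cases h2 : m == "DCBO" <;> simp [List.contains, List.elem, h1, h2]

-- B's snapshot as a fold over range(t), and basic facts about it
theorem pvBSnapshot_zero (T : Int) (data : List (String × List (List (List (String × List (Option Int)))))) (lv : List String) (m : String) (r : Int) :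
    pvBSnapshot T data lv m r 0 = pvBlank T lv := by
  unfold pvBSnapshot; simp

theorem pvBSnapshot_eq_fold (T : Int) (data : List (String × List (List (List (String × List (Option Int)))))) (lv : List String) (m : String) (r t : Int) (ht : 0 ≤ t) :
    pvBSnapshot T data lv m r t
      = (PySem.List.pyRange 0 t 1).foldl (fun blanket i =>
          let blanket := lv.foldl (fun b var =>
              pvSet b var (PySem.List.pySetD (pvGet b var) i
                (PySem.List.pyGetD (pvGet (pvValues data m r) var) i none))) blanket
          if (PySem.List.pyGetD (pvGet (pvValues data m r) "X") i none).isSome && (m == "CBO" || m == "DCBO") then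
            pvSet blanket "Z" (PySem.List.pySetD (pvGet blanket "Z") i none)
          else blanket) (pvBlank T lv) := by
  unfold pvBSnapshot
  by_cases h : t = 0
  · subst h; rw [PySem.List.pyRange_one_eq_nil (le_refl 0)]; simp
  · simp only [if_neg h]

theorem pvBSnapshot_X_length (T : Int) (data : List (String × List (List (List (String × List (Option Int)))))) (lv : List String) (m : String) (r t : Int) (ht : 0 ≤ t) (hX : "X" ∈ lv) :
    (pvGet (pvBSnapshot T data lv m r t) "X").length = T.toNat := by
  rw [pvBSnapshot_eq_fold T data lv m r t ht]
  have base : (pvGet (pvBlank T lv) "X").length = T.toNat := by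
    rw [pvGet_blank, if_pos hX]; simp
  have pres : ∀ (l : List Int), (∀ i ∈ l, 0 ≤ i) →
      ∀ b : List (String × List (Option Int)), (pvGet b "X").length = T.toNat →
      (pvGet (l.foldl (fun blanket i =>
          let blanket := lv.foldl (fun b var =>
              pvSet b var (PySem.List.pySetD (pvGet b var) i
                (PySem.List.pyGetD (pvGet (pvValues data m r) var) i none))) blanket
          if (PySem.List.pyGetD (pvGet (pvValues data m r) "X") i none).isSome && (m == "CBO" || m == "DCBO") then
            pvSet blanket "Z" (PySem.List.pySetD (pvGet blanket "Z") i none)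
          else blanket) b) "X").length = T.toNat := by
    intro l
    induction l with
    | nil => intro _ b hb; exact hb
    | cons i rest ih =>
      intro hpos b hb
      have hi : (0 : Int) ≤ i := hpos i List.mem_cons_self
      simp only [List.foldl_cons]
      apply ih (fun j hj => hpos j (List.mem_cons_of_mem i hj))
      have hfill : (pvGet (lv.foldl (fun b var =>
          pvSet b var (PySem.List.pySetD (pvGet b var) i
            (PySem.List.pyGetD (pvGet (pvValues data m r) var) i none))) b) "X").length = T.toNat := by
        rw [pvGet_fill (pvValues data m r) i hi lv b "X", if_pos hX, PySem.List.length_pySetD]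
        exact hb
      split
      · rw [pvGet_pvSet, if_neg (by decide)]
        exact hfill
      · exact hfill
  exact pres _ (fun i hi => (PySem.List.mem_pyRange_one.1 hi).1) _ base

-- one t-step of A, applied to the previous cumulative snapshot, yields B's next snapshot
theorem pvStep_snapshot (T : Int) (data : List (String × List (List (List (String × List (Option Int)))))) (lv : List String) (m : String) (r t : Int)
    (hX : "X" ∈ lv) (h1 : 1 ≤ t) (h2 : t < T) :
    (let blanket := lv.foldl (fun b var =>
        pvSet b var (PySem.List.pySetD (pvGet b var) (t - 1)
          (PySem.List.pyGetD (pvGet (pvValues data m r) var) (t - 1) none))) (pvBSnapshot T data lv m r (t - 1))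
     if (PySem.List.pyGetD (pvGet blanket "X") (t - 1) none).isSome && ["CBO", "DCBO"].contains m then
        pvSet blanket "Z" (PySem.List.pySetD (pvGet blanket "Z") (t - 1) none)
     else blanket)
      = pvBSnapshot T data lv m r t := by
  have hlen := pvBSnapshot_X_length T data lv m r (t - 1) (by omega) hX
  have hcond : PySem.List.pyGetD (pvGet (lv.foldl (fun b var =>
      pvSet b var (PySem.List.pySetD (pvGet b var) (t - 1)
        (PySem.List.pyGetD (pvGet (pvValues data m r) var) (t - 1) none))) (pvBSnapshot T data lv m r (t - 1))) "X") (t - 1) none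
      = PySem.List.pyGetD (pvGet (pvValues data m r) "X") (t - 1) none := by
    rw [pvGet_fill (pvValues data m r) (t - 1) (by omega) lv _ "X", if_pos hX]
    exact pvGetD_pvSetD_self _ _ _ _ (by omega) (by omega)
  rw [pvBSnapshot_eq_fold T data lv m r t (by omega),
    show PySem.List.pyRange 0 t 1 = PySem.List.pyRange 0 (t - 1) 1 ++ [t - 1] by
      rw [← PySem.List.pyRange_one_succ_right (by omega : (0 : Int) ≤ t - 1)]
      congr 1
      omega,
    List.foldl_append]
  rw [← pvBSnapshot_eq_fold T data lv m r (t - 1) (by omega)]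
  simp only [List.foldl_cons, List.foldl_nil]
  rw [hcond, pvContains_eq]

-- A's t-loop invariant: after processing t = 1..k-1 the first k snapshots are B's snapshots
theorem pvTLevel (T : Int) (data : List (String × List (List (List (String × List (Option Int)))))) (lv : List String) (m : String) (r : Int)
    (hX : "X" ∈ lv) (k : Int) (hk1 : 1 ≤ k) (hk2 : k ≤ T) :
    (PySem.List.pyRange 1 k 1).foldl (pvAStep data lv m r)
        ((PySem.List.pyRange 0 T 1).map (fun _ => pvBlank T lv))
      = (PySem.List.pyRange 0 T 1).map (fun j => if j < k then pvBSnapshot T data lv m r j else pvBlank T lv) := by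
  induction k, hk1 using Int.le_induction with
  | base =>
    rw [PySem.List.pyRange_one_eq_nil (le_refl 1), List.foldl_nil]
    apply List.map_congr_left
    intro j hj
    have hj' := PySem.List.mem_pyRange_one.1 hj
    by_cases h : j < 1
    · rw [if_pos h, show j = 0 by omega, pvBSnapshot_zero]
    · rw [if_neg h]
  | succ k _hk ih =>
    rw [PySem.List.pyRange_one_succ_right (by omega : (1 : Int) ≤ k), List.foldl_append,
      ih (by omega), List.foldl_cons, List.foldl_nil]
    have hgetp : PySem.List.pyGetD ((PySem.List.pyRange 0 T 1).map
        (fun j => if j < k then pvBSnapshot T data lv m r j else pvBlank T lv)) (k - 1) []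
        = pvBSnapshot T data lv m r (k - 1) := by
      rw [PySem.List.pyGetD_map_pyRange_of_nonneg _ T (k - 1) [] (by omega) (by omega), if_pos (by omega)]
    have hlen : (k).toNat < ((PySem.List.pyRange 0 T 1).map
        (fun j => if j < k then pvBSnapshot T data lv m r j else pvBlank T lv)).length := by
      simp only [List.length_map, PySem.List.length_pyRange_one]; omega
    unfold pvAStep
    simp only []
    rw [hgetp, pvGetD_pvSetD_self _ _ _ _ (by omega) hlen,
      pvStep_snapshot T data lv m r k hX (by omega) (by omega),
      pvSetD_idem _ _ _ _ (by omega),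
      pvSetD_map_pyRange _ T k _ (by omega) (by omega)]
    apply List.map_congr_left
    intro j hj
    have hj' := PySem.List.mem_pyRange_one.1 hj
    by_cases hjk : j = k
    · rw [if_pos hjk, if_pos (by omega), hjk]
    · rw [if_neg hjk]
      by_cases hjlt : j < k
      · rw [if_pos hjlt, if_pos (by omega)]
      · rw [if_neg hjlt, if_neg (by omega)]

-- A's r-loop invariant (generic in the per-replicate transform G)
theorem pvRLevel {α : Type} (G : Int → α → α) (d : α) (n : Int) (c : α) (k : Int) (hk1 : 0 ≤ k) (hk2 : k ≤ n) :
    (PySem.List.pyRange 0 k 1).foldl (fun reps r =>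
        PySem.List.pySetD reps r (G r (PySem.List.pyGetD reps r d))) ((PySem.List.pyRange 0 n 1).map (fun _ => c))
      = (PySem.List.pyRange 0 n 1).map (fun ρ => if ρ < k then G ρ c else c) := by
  induction k, hk1 using Int.le_induction with
  | base =>
    rw [PySem.List.pyRange_one_eq_nil (le_refl 0), List.foldl_nil]
    apply List.map_congr_left
    intro j hj
    have hj' := PySem.List.mem_pyRange_one.1 hj
    rw [if_neg (by omega)]
  | succ k _hk ih =>
    rw [PySem.List.pyRange_one_succ_right (by omega : (0 : Int) ≤ k), List.foldl_append,
      ih (by omega), List.foldl_cons, List.foldl_nil]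
    rw [PySem.List.pyGetD_map_pyRange_of_nonneg _ n k d (by omega) (by omega), if_neg (by omega),
      pvSetD_map_pyRange _ n k _ (by omega) (by omega)]
    apply List.map_congr_left
    intro j hj
    have hj' := PySem.List.mem_pyRange_one.1 hj
    by_cases hjk : j = k
    · rw [if_pos hjk, if_pos (by omega), hjk]
    · rw [if_neg hjk]
      by_cases hjlt : j < k
      · rw [if_pos hjlt, if_pos (by omega)]
      · rw [if_neg hjlt, if_neg (by omega)]

-- items of a modify-fold over distinct keys of an association list
theorem pvItems_modify_fold {V : Type} (dflt : V) (F : String → V → V) :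
    ∀ (l : List String) (pre : List (String × V)) (g : String → V),
    (∀ p ∈ pre, p.1 ∉ l) → l.Nodup →
    ((l.foldl (fun d k => PySem.Dict.modify d k dflt (F k)) (PySem.Dict.mk (pre ++ l.map (fun k => (k, g k))))).items)
      = pre ++ l.map (fun k => (k, F k (g k))) := by
  intro l
  induction l with
  | nil => intro pre g _ _; simp
  | cons k rest ih =>
    intro pre g hpre hnd
    have hknr : k ∉ rest := (List.nodup_cons.1 hnd).1
    have hndr : rest.Nodup := (List.nodup_cons.1 hnd).2
    simp only [List.foldl_cons]
    have hget : (PySem.Dict.mk (pre ++ (k :: rest).map (fun k => (k, g k)))).getD k dflt = g k := by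
      rw [PySem.Dict.getD_eq_get?_getD]
      have hfind : List.find? (fun p => p.1 == k) pre = none := by
        apply List.find?_eq_none.2
        intro p hp
        have hnot := hpre p hp
        simp only [beq_iff_eq]
        intro hc; exact hnot (hc ▸ List.mem_cons_self)
      simp [PySem.Dict.get?, List.find?_append, hfind]
    have hcont : (PySem.Dict.mk (pre ++ (k :: rest).map (fun k => (k, g k)))).contains k = true := by
      rw [PySem.Dict.contains_eq_decide_mem_keys]
      simp [PySem.Dict.keys]
    have hitems : ((PySem.Dict.mk (pre ++ (k :: rest).map (fun k => (k, g k)))).modify k dflt (F k)).items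
        = (pre ++ [(k, F k (g k))]) ++ rest.map (fun k => (k, g k)) := by
      unfold PySem.Dict.modify
      rw [hget, PySem.Dict.items_insert_of_contains _ _ hcont]
      simp only [List.map_cons, List.map_append]
      have h1 : pre.map (fun p => if (p.1 == k) = true then (k, F k (g k)) else p) = pre := by
        rw [List.map_congr_left (g := id), List.map_id]
        intro p hp
        simp only [id_eq, ite_eq_right_iff]
        intro hc
        exact absurd ((beq_iff_eq).1 hc ▸ List.mem_cons_self) (hpre p hp)
      have h2 : (rest.map (fun k => (k, g k))).map (fun p => if (p.1 == k) = true then (k, F k (g k)) else p)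
          = rest.map (fun k => (k, g k)) := by
        rw [List.map_map, List.map_congr_left]
        intro x hx
        simp only [Function.comp_apply, ite_eq_right_iff]
        intro hc
        exact absurd ((beq_iff_eq).1 hc ▸ hx) hknr
      simp only [h1, h2]
      simp
    have heq : ((PySem.Dict.mk (pre ++ (k :: rest).map (fun k => (k, g k)))).modify k dflt (F k))
        = PySem.Dict.mk ((pre ++ [(k, F k (g k))]) ++ rest.map (fun k => (k, g k))) := by
      apply PySem.Dict.ext; exact hitems
    rw [heq, ih (pre ++ [(k, F k (g k))]) g ?hpre' hndr]
    · simp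
    · intro p hp
      rcases List.mem_append.1 hp with h | h
      · intro hin; exact hpre p h (List.mem_cons_of_mem _ hin)
      · simp only [List.mem_singleton] at h
        subst h; exact hknr

-- ===== VERDICT (by name: the statement is the Claim_ definition above) =====
theorem get_stored_blanket_spec : Claim_equal_get_stored_blanket := by
  intro T data n lv _ hpre
  obtain ⟨hnodup, hrest⟩ := hpre
  unfold Spec_get_stored_blanket
  have hkeys : (PySem.Dict.mk data).keys = data.map Prod.fst := rfl
  have hA : get_stored_blanket T data n lv
      = (data.map Prod.fst).map (fun m => (m,
          (PySem.List.pyRange 0 n 1).foldl (fun reps r =>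
            PySem.List.pySetD reps r
              ((PySem.List.pyRange 1 T 1).foldl (pvAStep data lv m r)
                (PySem.List.pyGetD reps r [])))
            ((PySem.List.pyRange 0 n 1).map (fun _ =>
              (PySem.List.pyRange 0 T 1).map (fun _ => pvBlank T lv))))) := by
    unfold get_stored_blanket
    rw [hkeys]
    have h0 : ((data.map Prod.fst).foldl (fun sb model =>
        sb.insert model ((PySem.List.pyRange 0 n 1).map (fun _ =>
          (PySem.List.pyRange 0 T 1).map (fun _ => pvBlank T lv)))) PySem.Dict.empty)
        = PySem.Dict.mk ([] ++ (data.map Prod.fst).map (fun m => (m,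
            (PySem.List.pyRange 0 n 1).map (fun _ =>
              (PySem.List.pyRange 0 T 1).map (fun _ => pvBlank T lv))))) := by
      apply PySem.Dict.ext
      have h := PySem.Dict.items_foldl_insert_fresh (data.map Prod.fst) (fun a => a)
        (fun _ => (PySem.List.pyRange 0 n 1).map (fun _ =>
          (PySem.List.pyRange 0 T 1).map (fun _ => pvBlank T lv)))
        PySem.Dict.empty (fun a _ => PySem.Dict.contains_empty a) (by simpa using hnodup)
      simpa using h
    rw [h0]
    have h := pvItems_modify_fold ([] : List (List (List (String × List (Option Int)))))
      (fun m reps => (PySem.List.pyRange 0 n 1).foldl (fun reps r =>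
        PySem.List.pySetD reps r
          ((PySem.List.pyRange 1 T 1).foldl (pvAStep data lv m r)
            (PySem.List.pyGetD reps r []))) reps)
      (data.map Prod.fst) []
      (fun _ => (PySem.List.pyRange 0 n 1).map (fun _ =>
        (PySem.List.pyRange 0 T 1).map (fun _ => pvBlank T lv)))
      (by intro p hp; cases hp) hnodup
    exact h
  have hB : get_stored_blanket_alt T data n lv
      = (data.map Prod.fst).map (fun m => (m,
          (PySem.List.pyRange 0 n 1).map (fun r =>
            (PySem.List.pyRange 0 T 1).map (fun t => pvBSnapshot T data lv m r t)))) := by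
    unfold get_stored_blanket_alt
    rw [hkeys]
    have h := PySem.Dict.items_foldl_insert_fresh (data.map Prod.fst) (fun a => a)
      (fun m => (PySem.List.pyRange 0 n 1).map (fun r =>
        (PySem.List.pyRange 0 T 1).map (fun t => pvBSnapshot T data lv m r t)))
      PySem.Dict.empty (fun a _ => PySem.Dict.contains_empty a) (by simpa using hnodup)
    simpa using h
  rw [hA, hB]
  apply List.map_congr_left
  intro m hm
  refine congrArg (Prod.mk m) ?_
  by_cases hn : 0 ≤ n
  · refine Eq.trans (pvRLevel (fun r col => (PySem.List.pyRange 1 T 1).foldl (pvAStep data lv m r) col)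
      [] n ((PySem.List.pyRange 0 T 1).map (fun _ => pvBlank T lv)) n hn le_rfl) ?_
    apply List.map_congr_left
    intro r hr
    have hr' := PySem.List.mem_pyRange_one.1 hr
    rw [if_pos hr'.2]
    by_cases hT : 2 ≤ T
    · have hX : "X" ∈ lv := by
        rcases hrest with h | h | h | h
        · omega
        · omega
        · subst h; simp at hm
        · exact h.1
      refine Eq.trans (pvTLevel T data lv m r hX T (by omega) le_rfl) ?_
      apply List.map_congr_left
      intro t ht
      have ht' := PySem.List.mem_pyRange_one.1 ht
      rw [if_pos ht'.2]
    · rw [PySem.List.pyRange_one_eq_nil (by omega : T ≤ 1)]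
      show (PySem.List.pyRange 0 T 1).map (fun _ => pvBlank T lv) = _
      apply List.map_congr_left
      intro t ht
      have ht' := PySem.List.mem_pyRange_one.1 ht
      rw [show t = 0 by omega, pvBSnapshot_zero]
  · rw [PySem.List.pyRange_one_eq_nil (by omega : n ≤ 0)]
    simp
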